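-- pv_equiv track=rewrite | github.com/Jake1152/PS | Programmers/PCCP/mockTest01/01_loney_alphabet.py | solution
-- ===== SOURCE A (Python) =====
-- from collections import defaultdict
--
-- def solution(input_string):
--     loner_alphabets = ''
--     alpha = defaultdict(int)
--     prev_alpha = ''
--     for ch in input_string:
--         if alpha[ch] > 0 and \
--             prev_alpha != ch and \
--             ch not in loner_alphabets:
--             loner_alphabets += ch
--         alpha[ch] += 1
--         prev_alpha = ch
--     result = ''.join(sorted(loner_alphabets))
--     return result if result else 'N'
-- ===== SOURCE B (Python) =====
-- from itertools import groupby
-- from collections import Counter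
--
-- def solution(input_string):
--     # one char per maximal run, then count runs per char
--     counts = Counter(k for k, _ in groupby(input_string))
--     result = ''.join(sorted(c for c in counts if counts[c] >= 2))
--     return result if result else 'N'
-- ===== Notes on version B (the rewrite author's own statement) =====
-- stated objective: simpler
-- what changed: Replaces A's streaming prev-char/per-char-count/accumulated-string loop by a run-length collapse (groupby) followed by a Counter and a filter of characters with at least two runs.
import Mathlib
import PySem

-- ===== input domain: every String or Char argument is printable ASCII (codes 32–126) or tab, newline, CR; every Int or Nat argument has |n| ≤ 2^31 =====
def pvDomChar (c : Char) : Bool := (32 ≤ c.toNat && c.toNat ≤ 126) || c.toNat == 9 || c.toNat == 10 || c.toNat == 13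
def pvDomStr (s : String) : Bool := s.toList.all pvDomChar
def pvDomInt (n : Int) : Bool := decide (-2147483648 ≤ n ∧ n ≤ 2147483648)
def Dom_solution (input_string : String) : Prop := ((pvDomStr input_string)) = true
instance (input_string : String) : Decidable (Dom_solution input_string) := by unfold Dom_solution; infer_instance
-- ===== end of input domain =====

-- B replaces A's streaming prev-char/count/string-accumulation loop by a run-length
-- collapse followed by a run-count filter; same result, simpler decomposition.

-- ===== PORT A =====
-- one loop step: state = (loner_alphabets, alpha, prev_alpha); prev_alpha is '' or a 1-char
-- string, modelled as a List Char ([] or [c]); loner_alphabets as List Char (joined at the end).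
def solStepA (st : List Char × PySem.Dict Char Int × List Char) (ch : Char) :
    List Char × PySem.Dict Char Int × List Char :=
  let loner := st.1
  let alpha := st.2.1
  let prev := st.2.2
  let loner' := if alpha.getD ch 0 > 0 ∧ prev ≠ [ch] ∧ ch ∉ loner then loner ++ [ch] else loner
  (loner', alpha.modify ch 0 (· + 1), [ch])

def solution (input_string : String) : String :=
  let st := input_string.toList.foldl solStepA ([], PySem.Dict.empty, ([] : List Char))
  let result := PySem.List.sorted st.1 (fun c => c) false
  if result = [] then "N" else String.mk result

-- ===== PORT B =====
-- itertools.groupby keys: one character per maximal run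
def collapseAux (p : Char) : List Char → List Char
  | [] => []
  | c :: rest => if c = p then collapseAux p rest else c :: collapseAux c rest

def collapse : List Char → List Char
  | [] => []
  | c :: rest => c :: collapseAux c rest

def solution_alt (input_string : String) : String :=
  let ks := collapse input_string.toList
  let counts := PySem.Dict.counter ks
  let result := PySem.List.sorted (counts.keys.filter (fun c => counts.getD c 0 ≥ 2)) (fun c => c) false
  if result = [] then "N" else String.mk result

-- ===== PRECONDITION & SPEC =====
def Spec_solution (input_string : String) (out : String) : Prop := out = solution_alt input_string
instance (input_string : String) (out : String) : Decidable (Spec_solution input_string out) := by unfold Spec_solution; infer_instance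

-- ===== CLAIM (what is proved, stated in full; the proofs are below) =====
def Claim_equal_solution : Prop := ∀ (input_string : String), Dom_solution input_string → Spec_solution input_string (solution input_string)

-- ===== LEMMAS AND PROOFS =====

-- prev_alpha after processing `seen`: '' if seen is empty, else its last character
def lastS (seen : List Char) : List Char :=
  match seen.getLast? with
  | none => []
  | some c => [c]

theorem mem_of_mem_collapseAux {x p : Char} {l : List Char} (h : x ∈ collapseAux p l) : x ∈ l := by
  induction l generalizing p with
  | nil => simpa [collapseAux] using h
  | cons c rest ih =>
    simp only [collapseAux] at h
    split at h
    · exact List.mem_cons_of_mem _ (ih h)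
    · rcases List.mem_cons.mp h with h | h
      · simp [h]
      · exact List.mem_cons_of_mem _ (ih h)

theorem mem_collapseAux_of_mem {x p : Char} {l : List Char} (h : x ∈ l) :
    x = p ∨ x ∈ collapseAux p l := by
  induction l generalizing p with
  | nil => simp at h
  | cons c rest ih =>
    simp only [collapseAux]
    rcases List.mem_cons.mp h with h | h
    · subst h
      by_cases hc : x = p
      · simp [hc]
      · simp [hc]
    · by_cases hc : c = p
      · simpa [hc] using ih h
      · rcases ih (p := c) h with h' | h'
        · simp [hc, h']
        · simp [hc, h']

theorem mem_collapse {x : Char} {l : List Char} : x ∈ collapse l ↔ x ∈ l := by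
  cases l with
  | nil => simp [collapse]
  | cons c rest =>
    simp only [collapse, List.mem_cons]
    constructor
    · rintro (h | h)
      · simp [h]
      · exact Or.inr (mem_of_mem_collapseAux h)
    · rintro (h | h)
      · exact Or.inl h
      · rcases mem_collapseAux_of_mem (p := c) h with h' | h'
        · exact Or.inl h'
        · exact Or.inr h'

theorem collapseAux_append (p ch : Char) (l : List Char) :
    collapseAux p (l ++ [ch]) =
      if l.getLast?.getD p = ch then collapseAux p l else collapseAux p l ++ [ch] := by
  induction l generalizing p with
  | nil =>
    by_cases h : p = ch
    · simp [collapseAux, h]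
    · simp [collapseAux, h, Ne.symm h]
  | cons c rest ih =>
    simp only [List.cons_append, collapseAux]
    by_cases hc : c = p
    · subst hc
      simp only [ih c]
      cases rest with
      | nil => simp
      | cons d t => simp [List.getLast?_cons_cons]
    · simp only [if_neg hc, ih c]
      cases rest with
      | nil =>
        by_cases h : c = ch <;> simp [h, collapseAux]
      | cons d t =>
        rcases hx : (d :: t).getLast? with _ | x
        · simp at hx
        · simp only [List.getLast?_cons_cons, hx, Option.getD_some]
          split <;> simp

theorem collapse_append_singleton (l : List Char) (ch : Char) :
    collapse (l ++ [ch]) =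
      if l.getLast? = some ch then collapse l else collapse l ++ [ch] := by
  cases l with
  | nil => simp [collapse, collapseAux]
  | cons c rest =>
    simp only [List.cons_append, collapse, collapseAux_append c ch rest]
    cases rest with
    | nil => by_cases h : c = ch <;> simp [h]
    | cons d t =>
      rcases hx : (d :: t).getLast? with _ | x
      · simp at hx
      · simp only [Option.getD_some]
        split <;> simp_all

theorem lastS_eq_singleton_iff (seen : List Char) (ch : Char) :
    lastS seen = [ch] ↔ seen.getLast? = some ch := by
  unfold lastS
  cases h : seen.getLast? <;> simp

theorem lastS_append_singleton (seen : List Char) (ch : Char) :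
    lastS (seen ++ [ch]) = [ch] := by
  unfold lastS
  simp

theorem loopA_inv (l : List Char) :
    ∀ (seen loner : List Char) (alpha : PySem.Dict Char Int),
    (∀ c, alpha.getD c 0 = (seen.count c : Int)) →
    loner.Nodup →
    (∀ c, c ∈ loner ↔ 2 ≤ (collapse seen).count c) →
    (l.foldl solStepA (loner, alpha, lastS seen)).1.Nodup ∧
      ∀ c, c ∈ (l.foldl solStepA (loner, alpha, lastS seen)).1 ↔
        2 ≤ (collapse (seen ++ l)).count c := by
  induction l with
  | nil =>
    intro seen loner alpha _ H2 H3
    simpa using ⟨H2, H3⟩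
  | cons ch rest ih =>
    intro seen loner alpha H1 H2 H3
    have hstep : solStepA (loner, alpha, lastS seen) ch =
        ((if alpha.getD ch 0 > 0 ∧ lastS seen ≠ [ch] ∧ ch ∉ loner then loner ++ [ch] else loner),
          alpha.modify ch 0 (· + 1), lastS (seen ++ [ch])) := by
      simp [solStepA, lastS_append_singleton]
    have hmemseen : ∀ c : Char, (alpha.getD c 0 > 0) ↔ c ∈ seen := by
      intro c
      rw [H1 c, gt_iff_lt, Int.natCast_pos]
      exact List.count_pos_iff
    set C : Prop := alpha.getD ch 0 > 0 ∧ lastS seen ≠ [ch] ∧ ch ∉ loner with hC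
    set loner' : List Char := if C then loner ++ [ch] else loner with hl'
    -- the new hypotheses for seen ++ [ch]
    have H1' : ∀ c, (alpha.modify ch 0 (· + 1)).getD c 0 = ((seen ++ [ch]).count c : Int) := by
      intro c
      rw [PySem.Dict.getD_modify, List.count_append, H1 c, H1 ch]
      by_cases h : c = ch
      · subst h; simp
      · simp [h]
        exact List.count_eq_zero.mpr (by simp [h])
    have H2' : loner'.Nodup := by
      rw [hl']
      split
      · rename_i hc
        exact List.Nodup.append H2 (List.nodup_singleton ch)
          (List.disjoint_singleton.mpr hc.2.2)
      · exact H2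
    have H3' : ∀ c, c ∈ loner' ↔ 2 ≤ (collapse (seen ++ [ch])).count c := by
      intro c
      rw [collapse_append_singleton]
      by_cases hlast : seen.getLast? = some ch
      · -- continuing a run: nothing changes
        have hCfalse : ¬ C := by
          rw [hC]
          intro ⟨_, hne, _⟩
          exact hne ((lastS_eq_singleton_iff seen ch).mpr hlast)
        rw [hl', if_neg hCfalse, if_pos hlast]
        exact H3 c
      · rw [if_neg hlast]
        by_cases hcch : c = ch
        · subst hcch
          have hc1 : (collapse seen ++ [c]).count c = (collapse seen).count c + 1 := by
            simp [List.count_append]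
          rw [hc1]
          by_cases hCc : C
          · have hcntpos : 0 < (collapse seen).count c :=
              List.count_pos_iff.mpr (mem_collapse.mpr ((hmemseen c).mp hCc.1))
            rw [hl', if_pos hCc]
            simp only [List.mem_append, List.mem_singleton]
            constructor
            · intro _; omega
            · intro _; simp
          · rw [hl', if_neg hCc]
            by_cases hmem : c ∈ loner
            · have h2 := (H3 c).mp hmem
              exact ⟨fun _ => by omega, fun _ => hmem⟩
            · have hprev : lastS seen ≠ [c] := fun h =>
                hlast ((lastS_eq_singleton_iff seen c).mp h)
              have hnotpos : ¬ (alpha.getD c 0 > 0) := fun hpos => hCc ⟨hpos, hprev, hmem⟩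
              have hns : c ∉ seen := fun h => hnotpos ((hmemseen c).mpr h)
              have hcnt0 : (collapse seen).count c = 0 :=
                List.count_eq_zero.mpr (fun h => hns (mem_collapse.mp h))
              exact ⟨fun h => absurd h hmem, fun h => by omega⟩
        · have hone : List.count c [ch] = 0 := List.count_eq_zero.mpr (by simp [hcch])
          have hc0 : (collapse seen ++ [ch]).count c = (collapse seen).count c := by
            simp [List.count_append, hone]
          rw [hc0, hl']
          split
          · simp only [List.mem_append, List.mem_singleton]
            exact ⟨fun h => h.elim (H3 c).mp (fun h => absurd h hcch),
              fun h => Or.inl ((H3 c).mpr h)⟩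
          · exact H3 c
    have := ih (seen ++ [ch]) loner' (alpha.modify ch 0 (· + 1)) H1' H2' H3'
    rw [List.foldl_cons, hstep]
    simpa [List.append_assoc] using this

-- B's filtered key list: nodup, and membership is "at least two runs"
theorem B_filter_spec (ks : List Char) :
    ((PySem.Dict.counter ks).keys.filter (fun c => (PySem.Dict.counter ks).getD c 0 ≥ 2)).Nodup ∧
    ∀ c, c ∈ (PySem.Dict.counter ks).keys.filter (fun c => (PySem.Dict.counter ks).getD c 0 ≥ 2) ↔
      2 ≤ ks.count c := by
  constructor
  · exact List.Nodup.filter _ (by rw [PySem.Dict.keys_counter]; exact PySem.Set.nodup_ofList ks)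
  · intro c
    rw [List.mem_filter, PySem.Dict.keys_counter]
    simp only [PySem.Set.mem_ofList, PySem.Dict.getD_counter, decide_eq_true_eq]
    constructor
    · rintro ⟨_, h⟩
      exact_mod_cast h
    · intro h
      exact ⟨List.count_pos_iff.mp (by omega), by exact_mod_cast h⟩

-- ===== VERDICT (by name: the statement is the Claim_ definition above) =====
theorem solution_spec : Claim_equal_solution := by
  unfold Claim_equal_solution Spec_solution
  intro s _
  unfold solution solution_alt
  have hA := loopA_inv s.toList [] [] PySem.Dict.empty
    (by intro c; simp [PySem.Dict.getD_empty])
    List.nodup_nil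
    (by intro c; simp [collapse])
  rw [show lastS [] = ([] : List Char) from rfl] at hA
  simp only [List.nil_append] at hA
  obtain ⟨hAnd, hAmem⟩ := hA
  obtain ⟨hBnd, hBmem⟩ := B_filter_spec (collapse s.toList)
  have hperm : (s.toList.foldl solStepA ([], PySem.Dict.empty, ([] : List Char))).1.Perm
      ((PySem.Dict.counter (collapse s.toList)).keys.filter
        (fun c => (PySem.Dict.counter (collapse s.toList)).getD c 0 ≥ 2)) := by
    rw [List.perm_ext_iff_of_nodup hAnd hBnd]
    intro c
    rw [hAmem c, hBmem c]
  have hs := PySem.List.sorted_eq_sorted_of_perm _ _ (fun c => c)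
    (fun _ _ h => h) hperm
  simp only [hs]
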